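-- pv_equiv track=rewrite | github.com/harshitha-reddy10/Geeks-For-Geeks | day20.py | countIncreasing
-- ===== SOURCE A (Python) =====
-- def countIncreasing(arr):
--     n = len(arr)
--     count = 0
--     length = 1
--
--     for i in range(1, n):
--         if arr[i] > arr[i - 1]:
--             length += 1
--         else:
--             if length >= 2:
--                 count += (length * (length - 1)) // 2
--             length = 1
--
--     # handle last sequence
--     if length >= 2:
--         count += (length * (length - 1)) // 2
--
--     return count
-- ===== SOURCE B (Python) =====
-- def countIncreasing(arr):
--     count = 0
--     cur = 0  # increasing subarrays (length >= 2) ending at the current element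
--     for prev, x in zip(arr, arr[1:]):
--         if x > prev:
--             cur += 1
--             count += cur
--         else:
--             cur = 0
--     return count
-- ===== Notes on version B (the rewrite author's own statement) =====
-- stated objective: simpler
-- what changed: Replaces the run-length tracking plus closed-form triangular formula (applied at each run end and once after the loop) by an incremental DP over adjacent pairs: a running count of increasing subarrays ending at the current index, accumulated directly, with no arithmetic formula and no post-loop fix-up.
import Mathlib
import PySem

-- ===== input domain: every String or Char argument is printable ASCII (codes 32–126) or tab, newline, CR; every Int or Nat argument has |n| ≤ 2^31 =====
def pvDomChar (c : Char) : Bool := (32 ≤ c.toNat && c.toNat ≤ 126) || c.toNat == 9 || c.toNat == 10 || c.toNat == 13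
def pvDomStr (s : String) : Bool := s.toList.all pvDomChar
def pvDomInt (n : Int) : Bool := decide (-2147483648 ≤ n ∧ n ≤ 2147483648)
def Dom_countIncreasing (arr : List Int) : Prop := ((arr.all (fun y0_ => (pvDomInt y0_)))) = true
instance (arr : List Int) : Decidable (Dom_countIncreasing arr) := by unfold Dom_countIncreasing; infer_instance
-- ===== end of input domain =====

-- B replaces the run-length + triangular-formula arithmetic by an incremental DP over adjacent pairs (simpler; same O(n) cost).

-- ===== PORT A =====
-- state = (count, length); body of 'for i in range(1, n)'
def countIncreasingStep (arr : List Int) (s : Int × Int) (i : Int) : Int × Int :=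
  if PySem.List.pyGetD arr i 0 > PySem.List.pyGetD arr (i - 1) 0 then
    (s.1, s.2 + 1)
  else
    ((if s.2 ≥ 2 then s.1 + PySem.Int.floordiv (s.2 * (s.2 - 1)) 2 else s.1), 1)

-- the post-loop 'if length >= 2: count += length*(length-1)//2'
def countIncreasingFinish (s : Int × Int) : Int :=
  if s.2 ≥ 2 then s.1 + PySem.Int.floordiv (s.2 * (s.2 - 1)) 2 else s.1

def countIncreasing (arr : List Int) : Int :=
  countIncreasingFinish
    ((PySem.List.pyRange 1 (PySem.List.len arr) 1).foldl (countIncreasingStep arr) (0, 1))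

-- ===== PORT B =====
-- state = (count, cur); body of 'for prev, x in zip(arr, arr[1:])'
def countIncreasingAltStep (s : Int × Int) (p : Int × Int) : Int × Int :=
  if p.2 > p.1 then (s.1 + (s.2 + 1), s.2 + 1) else (s.1, 0)

def countIncreasing_alt (arr : List Int) : Int :=
  ((List.zip arr (PySem.List.slice arr (some 1) none)).foldl countIncreasingAltStep (0, 0)).1

-- ===== PRECONDITION & SPEC =====
def Spec_countIncreasing (arr : List Int) (out : Int) : Prop := out = countIncreasing_alt arr
instance (arr : List Int) (out : Int) : Decidable (Spec_countIncreasing arr out) := by unfold Spec_countIncreasing; infer_instance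

-- ===== CLAIM (what is proved, stated in full; the proofs are below) =====
def Claim_equal_countIncreasing : Prop := ∀ (arr : List Int), Dom_countIncreasing arr → Spec_countIncreasing arr (countIncreasing arr)

-- ===== LEMMAS AND PROOFS =====

-- triangular number: tri l = l*(l-1)//2
def pvTri (l : Int) : Int := PySem.Int.floordiv (l * (l - 1)) 2

theorem pvTri_eq (l : Int) : pvTri l = l * (l - 1) / 2 :=
  PySem.Int.floordiv_eq_ediv_of_pos (by norm_num)

theorem pvTri_succ (l : Int) : pvTri (l + 1) = pvTri l + l := by
  rw [pvTri_eq, pvTri_eq]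
  obtain ⟨k, hk⟩ := Int.even_mul_succ_self (l - 1)
  have h1 : l * (l - 1) = 2 * k := by rw [show l * (l - 1) = (l - 1) * (l - 1 + 1) by ring, hk]; ring
  have h2 : (l + 1) * (l + 1 - 1) = 2 * (k + l) := by
    have h3 : (l + 1) * (l + 1 - 1) = l * (l - 1) + 2 * l := by ring
    rw [h3, h1]; ring
  rw [h1, h2, Int.mul_ediv_cancel_left _ two_ne_zero, Int.mul_ediv_cancel_left _ two_ne_zero]

theorem pvTri_one : pvTri 1 = 0 := by decide

theorem pvFinish_eq (s : Int × Int) :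
    countIncreasingFinish s = if s.2 ≥ 2 then s.1 + pvTri s.2 else s.1 := rfl

-- A's step, expressed on the adjacent pair itself
def pvStepAp (s : Int × Int) (p : Int × Int) : Int × Int :=
  if p.2 > p.1 then (s.1, s.2 + 1) else ((if s.2 ≥ 2 then s.1 + pvTri s.2 else s.1), 1)

-- A's indexed fold is the pairwise fold of pvStepAp over the zip of adjacent elements
theorem pvBridgeA (arr : List Int) (m : Nat) :
    ∀ (k : Nat) (s : Int × Int), arr.length ≤ k + 1 + m →
    (PySem.List.pyRange ((k : Int) + 1) (PySem.List.len arr) 1).foldl (countIncreasingStep arr) s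
      = (List.zip (arr.drop k) (arr.drop (k + 1))).foldl pvStepAp s := by
  induction m with
  | zero =>
    intro k s h
    rw [show PySem.List.pyRange ((k : Int) + 1) (PySem.List.len arr) 1 = [] from
        PySem.List.pyRange_one_eq_nil (by simp [PySem.List.len_eq]; omega),
      show arr.drop (k + 1) = [] from List.drop_eq_nil_of_le (by omega),
      List.zip_nil_right]
    rfl
  | succ m ih =>
    intro k s h
    by_cases hk : arr.length ≤ k + 1
    · rw [show PySem.List.pyRange ((k : Int) + 1) (PySem.List.len arr) 1 = [] from
          PySem.List.pyRange_one_eq_nil (by simp [PySem.List.len_eq]; omega),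
        show arr.drop (k + 1) = [] from List.drop_eq_nil_of_le (by omega),
        List.zip_nil_right]
      rfl
    · rw [Nat.not_le] at hk
      rw [show PySem.List.pyRange ((k : Int) + 1) (PySem.List.len arr) 1
            = ((k : Int) + 1) :: PySem.List.pyRange ((k : Int) + 1 + 1) (PySem.List.len arr) 1 from
          PySem.List.pyRange_one_cons (by simp [PySem.List.len_eq]; omega)]
      have hdk : arr.drop k = arr[k] :: arr.drop (k + 1) :=
        List.drop_eq_getElem_cons (by omega)
      have hdk1 : arr.drop (k + 1) = arr[k + 1] :: arr.drop (k + 2) :=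
        List.drop_eq_getElem_cons (by omega)
      rw [hdk, hdk1, List.zip_cons_cons, List.foldl_cons, List.foldl_cons]
      have e1 : PySem.List.pyGetD arr ((k : Int) + 1) 0 = arr[k + 1] := by
        rw [PySem.List.pyGetD_eq_getElem arr 0 (by positivity) (by omega)]
        simp [show ((k : Int) + 1).toNat = k + 1 by omega]
      have e2 : PySem.List.pyGetD arr ((k : Int) + 1 - 1) 0 = arr[k] := by
        rw [PySem.List.pyGetD_eq_getElem arr 0 (by omega) (by omega)]
        simp
      have estep : countIncreasingStep arr s ((k : Int) + 1)
          = pvStepAp s (arr[k], arr[k + 1]) := by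
        simp only [countIncreasingStep, pvStepAp, pvTri, e1, e2]
      rw [estep, show (k : Int) + 1 + 1 = ((k + 1 : Nat) : Int) + 1 by push_cast; ring,
        ih (k + 1) _ (by omega), ← hdk1]

-- joint invariant: B's count runs ahead of A's by tri of the current run length
theorem pvMain (ps : List (Int × Int)) :
    ∀ (cA len cB cur : Int), 1 ≤ len → cur = len - 1 → cB = cA + pvTri len →
    countIncreasingFinish (ps.foldl pvStepAp (cA, len))
      = (ps.foldl countIncreasingAltStep (cB, cur)).1 := by
  induction ps with
  | nil =>
    intro cA len cB cur hlen hcur hcB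
    simp only [List.foldl_nil, pvFinish_eq]
    by_cases h2 : len ≥ 2
    · simp [h2, hcB]
    · have hl1 : len = 1 := by omega
      simp [hl1, hcB, pvTri_one]
  | cons p ps ih =>
    intro cA len cB cur hlen hcur hcB
    simp only [List.foldl_cons, pvStepAp, countIncreasingAltStep]
    by_cases hp : p.2 > p.1
    · simp only [if_pos hp]
      exact ih cA (len + 1) (cB + (cur + 1)) (cur + 1) (by omega) (by omega)
        (by rw [hcB, pvTri_succ]; omega)
    · simp only [if_neg hp]
      refine ih _ 1 cB 0 le_rfl (by norm_num) ?_
      rw [pvTri_one]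
      by_cases h2 : len ≥ 2
      · simp [h2, hcB]
      · have hl1 : len = 1 := by omega
        simp [hl1, hcB, pvTri_one]

theorem pvSliceTail (arr : List Int) : PySem.List.slice arr (some 1) none = arr.drop 1 := by
  simp [pysem]

-- ===== VERDICT (by name: the statement is the Claim_ definition above) =====
theorem countIncreasing_spec : Claim_equal_countIncreasing := by
  intro arr _
  unfold Spec_countIncreasing countIncreasing countIncreasing_alt
  rw [pvSliceTail]
  have hb := pvBridgeA arr arr.length 0 (0, 1) (by omega)
  simp only [Nat.cast_zero, zero_add, List.drop_zero] at hb
  rw [hb]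
  exact pvMain (List.zip arr (arr.drop 1)) 0 1 0 0 le_rfl (by norm_num) (by simp [pvTri_one])
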